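-- pv_equiv track=rewrite | github.com/greenfox-velox/attilakrupl | break/Python CW practice/SumDigNth.py | sumDig_nthTerm
-- ===== SOURCE A (Python) =====
-- def sumDig_nthTerm(initVal, patternL, nthTerm):
--     nth = initVal
--     for i in range(nthTerm-1):
--         nth += patternL[i%len(patternL)]
--     nth = str(nth)
--     x = 0
--     for i in range(len(nth)):
--         x += int(nth[i])
--     return x
-- ===== SOURCE B (Python) =====
-- def sumDig_nthTerm(initVal, patternL, nthTerm):
--     steps = nthTerm - 1 if nthTerm > 1 else 0
--     if steps and patternL:
--         q, r = divmod(steps, len(patternL))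
--         nth = initVal + q * sum(patternL) + sum(patternL[:r])
--     else:
--         nth = initVal
--     return sum(int(c) for c in str(nth))
-- ===== Notes on version B (the rewrite author's own statement) =====
-- stated objective: faster
-- what changed: B replaces the O(nthTerm) cyclic accumulation loop by a closed form (full cycles times sum(patternL) plus a prefix sum of the remainder) and computes the digit sum with a single comprehension over str(nth); intended as faster when nthTerm dominates (on inputs dominated by pattern length both are linear).
import Mathlib
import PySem

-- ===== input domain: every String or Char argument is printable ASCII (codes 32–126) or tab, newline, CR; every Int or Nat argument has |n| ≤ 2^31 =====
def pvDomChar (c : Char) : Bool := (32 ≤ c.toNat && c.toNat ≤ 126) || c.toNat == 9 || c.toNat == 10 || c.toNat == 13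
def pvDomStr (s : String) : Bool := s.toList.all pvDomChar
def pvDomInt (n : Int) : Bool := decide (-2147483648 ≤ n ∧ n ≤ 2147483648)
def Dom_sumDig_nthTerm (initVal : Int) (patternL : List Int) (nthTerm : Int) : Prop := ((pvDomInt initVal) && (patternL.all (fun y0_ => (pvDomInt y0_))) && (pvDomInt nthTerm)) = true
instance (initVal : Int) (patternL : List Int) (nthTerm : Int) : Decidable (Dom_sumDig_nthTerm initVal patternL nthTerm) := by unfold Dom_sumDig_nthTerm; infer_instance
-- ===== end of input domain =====

-- B replaces A's O(nthTerm) cyclic accumulation loop by a closed form (full cycles * sum(patternL)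
-- + prefix sum of the remainder); intended as faster when nthTerm
-- dominates; on inputs dominated by pattern length both are linear.


-- ===== PORT A =====
-- literal port: accumulate patternL[i % len(patternL)] for i in range(nthTerm-1),
-- then sum int(str(nth)[i]) over the characters of str(nth)
def sumDig_nthTerm (initVal : Int) (patternL : List Int) (nthTerm : Int) : Int :=
  let nth := (PySem.List.pyRange 0 (nthTerm - 1)).foldl
      (fun nth i => nth + PySem.List.pyGetD patternL (PySem.Int.mod i (patternL.length : Int)) 0) initVal
  let s := PySem.Int.toChars nth
  (PySem.List.pyRange 0 (s.length : Int)).foldl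
      (fun x i => x + (PySem.Int.ofChars? [PySem.List.pyGetD s i ' ']).getD 0) 0

-- ===== PORT B =====
-- literal port of Source B: closed-form accumulation, then one map-sum over the digits of str(nth)
def sumDig_nthTerm_alt (initVal : Int) (patternL : List Int) (nthTerm : Int) : Int :=
  let steps : Int := if 1 < nthTerm then nthTerm - 1 else 0
  let nth : Int :=
    if steps ≠ 0 ∧ patternL ≠ [] then
      let q := PySem.Int.floordiv steps (patternL.length : Int)
      let r := PySem.Int.mod steps (patternL.length : Int)
      initVal + q * patternL.sum + (PySem.List.slice patternL none (some r)).sum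
    else initVal
  ((PySem.Int.toChars nth).map (fun c => (PySem.Int.ofChars? [c]).getD 0)).sum

-- ===== PRECONDITION & SPEC =====
-- Pre_ excludes exactly the inputs on which the Python A raises: an empty pattern with
-- nthTerm > 1 (ZeroDivisionError on i % len([])), and a negative accumulated value
-- (ValueError from int('-') on the sign character of str(nth)).
def Pre_sumDig_nthTerm (initVal : Int) (patternL : List Int) (nthTerm : Int) : Prop :=
  (1 < nthTerm → patternL ≠ []) ∧
  0 ≤ initVal + (if 1 < nthTerm ∧ patternL ≠ [] then
      PySem.Int.floordiv (nthTerm - 1) (patternL.length : Int) * patternL.sum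
      + (patternL.take (PySem.Int.mod (nthTerm - 1) (patternL.length : Int)).toNat).sum
    else 0)
instance (initVal : Int) (patternL : List Int) (nthTerm : Int) : Decidable (Pre_sumDig_nthTerm initVal patternL nthTerm) := by unfold Pre_sumDig_nthTerm; infer_instance

def pvWitness_sumDig_nthTerm : Int × List Int × Int := (10, [1, 2, 3], 5)

def Spec_sumDig_nthTerm (initVal : Int) (patternL : List Int) (nthTerm : Int) (out : Int) : Prop := out = sumDig_nthTerm_alt initVal patternL nthTerm
instance (initVal : Int) (patternL : List Int) (nthTerm : Int) (out : Int) : Decidable (Spec_sumDig_nthTerm initVal patternL nthTerm out) := by unfold Spec_sumDig_nthTerm; infer_instance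

-- ===== CLAIM (what is proved, stated in full; the proofs are below) =====
def Claim_equal_sumDig_nthTerm : Prop := ∀ (initVal : Int) (patternL : List Int) (nthTerm : Int), Dom_sumDig_nthTerm initVal patternL nthTerm → Pre_sumDig_nthTerm initVal patternL nthTerm → Spec_sumDig_nthTerm initVal patternL nthTerm (sumDig_nthTerm initVal patternL nthTerm)
-- ===== LEMMAS AND PROOFS =====

-- A's cyclic accumulation over range(k) equals the closed form: k/L full cycles plus a prefix.
lemma cyc_closed (patternL : List Int) (hpl : patternL ≠ []) (init : Int) (k : Nat) :
    (PySem.List.pyRange 0 (k : Int)).foldl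
      (fun a i => a + PySem.List.pyGetD patternL (PySem.Int.mod i (patternL.length : Int)) 0) init
    = init + ((k / patternL.length : Nat) : Int) * patternL.sum
        + (patternL.take (k % patternL.length)).sum := by
  have hL : 0 < patternL.length := List.length_pos_iff.mpr hpl
  induction k with
  | zero => simp [PySem.List.pyRange_one_eq_nil (by omega : (0:Int) ≤ 0)]
  | succ k ih =>
    have hcast : ((k + 1 : Nat) : Int) = (k : Int) + 1 := by push_cast; ring
    rw [hcast, PySem.List.pyRange_one_succ_right (by positivity), List.foldl_append, ih]
    have hmod : PySem.Int.mod (k : Int) (patternL.length : Int)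
        = ((k % patternL.length : Nat) : Int) := PySem.Int.mod_natCast k patternL.length
    have hlt : k % patternL.length < patternL.length := Nat.mod_lt _ hL
    simp only [List.foldl_cons, List.foldl_nil, hmod, PySem.List.pyGetD_natCast]
    rw [List.getD_eq_getElem _ _ hlt]
    obtain ⟨q, m, hm, hk⟩ : ∃ q m, m < patternL.length ∧ k = m + q * patternL.length :=
      ⟨k / patternL.length, k % patternL.length, hlt, (Nat.mod_add_div' k patternL.length).symm⟩
    have hmodk : k % patternL.length = m := by
      rw [hk, Nat.add_mul_mod_self_right, Nat.mod_eq_of_lt hm]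
    have hdivk : k / patternL.length = q := by
      rw [hk, Nat.add_mul_div_right _ _ hL, Nat.div_eq_of_lt hm, Nat.zero_add]
    have hk1 : k + 1 = m + 1 + q * patternL.length := by omega
    by_cases hfull : m + 1 = patternL.length
    · have h1 : (k + 1) % patternL.length = 0 := by
        rw [hk1, Nat.add_mul_mod_self_right, hfull, Nat.mod_self]
      have h2 : (k + 1) / patternL.length = q + 1 := by
        rw [hk1, Nat.add_mul_div_right _ _ hL, hfull, Nat.div_self hL]; omega
      have hts := List.sum_take_succ patternL m hm
      have htl : patternL.take (m + 1) = patternL := by rw [hfull, List.take_length]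
      rw [htl] at hts
      simp only [h1, h2, hmodk, hdivk, List.take_zero, List.sum_nil]
      push_cast
      linarith [hts]
    · have h1 : (k + 1) % patternL.length = m + 1 := by
        rw [hk1, Nat.add_mul_mod_self_right, Nat.mod_eq_of_lt (by omega)]
      have h2 : (k + 1) / patternL.length = q := by
        rw [hk1, Nat.add_mul_div_right _ _ hL, Nat.div_eq_of_lt (by omega), Nat.zero_add]
      simp only [h1, h2, hmodk, hdivk, List.sum_take_succ patternL m hm]
      ring

-- A's character loop over str(nth) is the map-sum B computes.
lemma digsum_eq (s : List Char) :
    (PySem.List.pyRange 0 (s.length : Int)).foldl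
      (fun x i => x + (PySem.Int.ofChars? [PySem.List.pyGetD s i ' ']).getD 0) 0
    = (s.map (fun c => (PySem.Int.ofChars? [c]).getD 0)).sum := by
  rw [PySem.List.foldl_pyRange_zero_pyGetD' s ' '
      (fun x c => x + (PySem.Int.ofChars? [c]).getD 0) 0,
    PySem.List.foldl_add, zero_add]

-- ===== VERDICT (by name: the statement is the Claim_ definition above) =====
theorem sumDig_nthTerm_spec : Claim_equal_sumDig_nthTerm := by
  intro initVal patternL nthTerm _ hpre
  unfold Spec_sumDig_nthTerm sumDig_nthTerm sumDig_nthTerm_alt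
  dsimp only
  rw [digsum_eq]
  by_cases h1 : 1 < nthTerm
  · have hpl : patternL ≠ [] := hpre.1 h1
    have hL : 0 < patternL.length := List.length_pos_iff.mpr hpl
    have hk : nthTerm - 1 = (((nthTerm - 1).toNat : Nat) : Int) := by omega
    have hsteps : (if 1 < nthTerm then nthTerm - 1 else 0) = nthTerm - 1 := if_pos h1
    rw [hsteps, if_pos ⟨by omega, hpl⟩, hk, cyc_closed patternL hpl initVal,
      PySem.Int.floordiv_natCast, PySem.Int.mod_natCast,
      PySem.List.slice_to patternL (by positivity)]
    simp only [Int.toNat_natCast]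
  · have hsteps : (if 1 < nthTerm then nthTerm - 1 else 0) = 0 := if_neg h1
    rw [hsteps, if_neg (by simp), PySem.List.pyRange_one_eq_nil (by omega), List.foldl_nil]
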